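-- pv_equiv track=rewrite | github.com/AndreaCensi/latex_gen | src/latex_gen/ifs.py | safecmd
-- ===== SOURCE A (Python) =====
-- def safecmd(s):
--     rep = {'-': '', '_': '', ':': '', '.': '',
--            '0': 'Z', '1': 'O', '2': 't', '3': 'T', '4': 'f',
--            '5': 'F', '6': 's', '7': 'S', '8': 'E',
--            '9': 'N'}
--     for a, b in list(rep.items()):
--         s = s.replace(a, b)
--     return s
-- ===== SOURCE B (Python) =====
-- def safecmd(s):
--     def sub(c):
--         if c in '-_:.':
--             return ''
--         if '0' <= c <= '9':
--             return 'ZOtTfFsSEN'[ord(c) - ord('0')]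
--         return c
--     out = []
--     for c in s:
--         out.append(sub(c))
--     return ''.join(out)
-- ===== Notes on version B (the rewrite author's own statement) =====
-- stated objective: simpler
-- what changed: A makes 14 sequential full-string replace passes driven by a substitution dict; B drops the dict entirely and builds the result in a single character-by-character pass, classifying each character (punctuation to delete, digit remapped by arithmetic index into 'ZOtTfFsSEN', otherwise kept) and joining the pieces.
import Mathlib
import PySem

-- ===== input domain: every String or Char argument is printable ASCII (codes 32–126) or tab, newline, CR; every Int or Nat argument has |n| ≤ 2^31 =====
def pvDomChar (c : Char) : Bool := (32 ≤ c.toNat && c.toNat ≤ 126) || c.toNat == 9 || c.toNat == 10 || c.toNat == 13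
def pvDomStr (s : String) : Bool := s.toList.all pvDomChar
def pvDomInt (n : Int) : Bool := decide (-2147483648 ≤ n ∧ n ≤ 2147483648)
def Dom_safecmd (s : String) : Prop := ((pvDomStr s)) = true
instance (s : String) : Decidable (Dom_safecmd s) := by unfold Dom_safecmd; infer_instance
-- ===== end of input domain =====

-- B replaces A's 14 dict-driven full-string replace passes by one character-by-character pass
-- that classifies each character directly (no dict): objective 'simpler'.

-- ===== PORT A =====
-- the substitution dict of A's source (insertion order of the Python literal)
def pvRep : PySem.Dict String String :=
  PySem.Dict.mk [("-", ""), ("_", ""), (":", ""), (".", ""),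
                 ("0", "Z"), ("1", "O"), ("2", "t"), ("3", "T"), ("4", "f"),
                 ("5", "F"), ("6", "s"), ("7", "S"), ("8", "E"), ("9", "N")]

def safecmd (s : String) : String :=
  pvRep.items.foldl (fun s ab => PySem.Str.replace s ab.1 ab.2) s

-- ===== PORT B =====
-- Source B's per-character helper sub(c): delete punctuation, remap a digit by arithmetic index
-- into 'ZOtTfFsSEN', keep anything else. The digit branch guarantees the index is in range,
-- so Option.elim's [] default is unreachable (a totalisation guard only).
def pvSubB (c : Char) : List Char :=
  if ['-', '_', ':', '.'].contains c then []
  else if '0' ≤ c ∧ c ≤ '9' then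
    (PySem.List.pyGet? ['Z','O','t','T','f','F','s','S','E','N']
      ((c.toNat : Int) - ('0'.toNat : Int))).elim [] (fun d => [d])
  else [c]

-- the for-loop accumulating out and the final ''.join(out)
def safecmd_alt (s : String) : String :=
  String.ofList (PySem.Chars.join [] (s.toList.foldl (fun out c => out ++ [pvSubB c]) []))

-- ===== PRECONDITION & SPEC =====
def Spec_safecmd (s : String) (out : String) : Prop := out = safecmd_alt s
instance (s : String) (out : String) : Decidable (Spec_safecmd s out) := by unfold Spec_safecmd; infer_instance

-- ===== CLAIM =====
def Claim_equal_safecmd : Prop := ∀ (s : String), Dom_safecmd s → Spec_safecmd s (safecmd s)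

-- ===== LEMMAS AND PROOFS =====

-- the combined one-character substitution both programs realise
def pvSub (c : Char) : List Char :=
  if c = '-' then [] else if c = '_' then [] else if c = ':' then [] else if c = '.' then []
  else if c = '0' then ['Z'] else if c = '1' then ['O'] else if c = '2' then ['t']
  else if c = '3' then ['T'] else if c = '4' then ['f'] else if c = '5' then ['F']
  else if c = '6' then ['s'] else if c = '7' then ['S'] else if c = '8' then ['E']
  else if c = '9' then ['N'] else [c]

-- replace's worker on a single-character pattern is a flatMap
lemma pv_go_single (a : Char) (new : List Char) :
    ∀ (fuel : Nat) (cs acc : List Char), cs.length ≤ fuel →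
      PySem.Chars.replace.go [a] new fuel cs acc
        = acc.reverse ++ cs.flatMap (fun c => if c = a then new else [c]) := by
  intro fuel
  induction fuel with
  | zero =>
    intro cs acc h
    cases cs with
    | nil => simp [PySem.Chars.replace.go]
    | cons c t => simp at h
  | succ n ih =>
    intro cs acc h
    cases cs with
    | nil => simp [PySem.Chars.replace.go]
    | cons c t =>
      rw [PySem.Chars.replace.go]
      by_cases hc : c = a
      · subst hc
        simp [List.isPrefixOf, ih t _ (by simpa using h)]
      · have : [a].isPrefixOf (c :: t) = false := by
          simp [List.isPrefixOf]; exact fun h' => absurd h'.symm hc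
        simp [this, ih t _ (by simpa using h), hc]

-- str.replace with a one-character pattern, as a flatMap
lemma pv_replace_single (a : Char) (new cs : List Char) :
    PySem.Chars.replace cs [a] new = cs.flatMap (fun c => if c = a then new else [c]) := by
  unfold PySem.Chars.replace
  simpa using pv_go_single a new cs.length cs [] le_rfl

-- A's 14 cascaded passes compute pvSub in one flatMap
lemma pv_toListA (s : String) : (safecmd s).toList = s.toList.flatMap pvSub := by
  have h1 : ("-" : String).toList = ['-'] := by decide
  have h2 : ("_" : String).toList = ['_'] := by decide
  have h3 : (":" : String).toList = [':'] := by decide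
  have h4 : ("." : String).toList = ['.'] := by decide
  have h5 : ("0" : String).toList = ['0'] := by decide
  have h6 : ("1" : String).toList = ['1'] := by decide
  have h7 : ("2" : String).toList = ['2'] := by decide
  have h8 : ("3" : String).toList = ['3'] := by decide
  have h9 : ("4" : String).toList = ['4'] := by decide
  have h10 : ("5" : String).toList = ['5'] := by decide
  have h11 : ("6" : String).toList = ['6'] := by decide
  have h12 : ("7" : String).toList = ['7'] := by decide
  have h13 : ("8" : String).toList = ['8'] := by decide
  have h14 : ("9" : String).toList = ['9'] := by decide
  have h0 : ("" : String).toList = [] := by decide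
  have hZ : ("Z" : String).toList = ['Z'] := by decide
  have hO : ("O" : String).toList = ['O'] := by decide
  have ht : ("t" : String).toList = ['t'] := by decide
  have hT : ("T" : String).toList = ['T'] := by decide
  have hf : ("f" : String).toList = ['f'] := by decide
  have hF : ("F" : String).toList = ['F'] := by decide
  have hs : ("s" : String).toList = ['s'] := by decide
  have hS : ("S" : String).toList = ['S'] := by decide
  have hE : ("E" : String).toList = ['E'] := by decide
  have hN : ("N" : String).toList = ['N'] := by decide
  simp only [safecmd, pvRep, List.foldl, PySem.Str.toList_replace,
    h1, h2, h3, h4, h5, h6, h7, h8, h9, h10, h11, h12, h13, h14,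
    h0, hZ, hO, ht, hT, hf, hF, hs, hS, hE, hN,
    pv_replace_single, List.flatMap_assoc]
  congr 1
  funext c
  by_cases k1 : c = '-'; · subst k1; rfl
  by_cases k2 : c = '_'; · subst k2; rfl
  by_cases k3 : c = ':'; · subst k3; rfl
  by_cases k4 : c = '.'; · subst k4; rfl
  by_cases k5 : c = '0'; · subst k5; rfl
  by_cases k6 : c = '1'; · subst k6; rfl
  by_cases k7 : c = '2'; · subst k7; rfl
  by_cases k8 : c = '3'; · subst k8; rfl
  by_cases k9 : c = '4'; · subst k9; rfl
  by_cases k10 : c = '5'; · subst k10; rfl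
  by_cases k11 : c = '6'; · subst k11; rfl
  by_cases k12 : c = '7'; · subst k12; rfl
  by_cases k13 : c = '8'; · subst k13; rfl
  by_cases k14 : c = '9'; · subst k14; rfl
  simp [pvSub, k1, k2, k3, k4, k5, k6, k7, k8, k9, k10, k11, k12, k13, k14]

-- ''.join with empty separator is flatten
lemma pv_join_nil (parts : List (List Char)) : PySem.Chars.join [] parts = parts.flatten := by
  induction parts with
  | nil => simp [PySem.Chars.join_nil]
  | cons h t ih =>
    cases t with
    | nil => simp [PySem.Chars.join_singleton]
    | cons h2 t2 => simp [PySem.Chars.join_cons_cons] at *; simp [ih]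

-- unequal characters have unequal codes
lemma pv_toNat_ne (c d : Char) (h : c ≠ d) : c.toNat ≠ d.toNat := by
  intro he
  exact h (by rw [← Char.ofNat_toNat c, he, Char.ofNat_toNat])

-- B's per-character classification computes pvSub
lemma pv_subB_eq (c : Char) : pvSubB c = pvSub c := by
  by_cases k1 : c = '-'; · subst k1; decide
  by_cases k2 : c = '_'; · subst k2; decide
  by_cases k3 : c = ':'; · subst k3; decide
  by_cases k4 : c = '.'; · subst k4; decide
  by_cases k5 : c = '0'; · subst k5; decide
  by_cases k6 : c = '1'; · subst k6; decide
  by_cases k7 : c = '2'; · subst k7; decide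
  by_cases k8 : c = '3'; · subst k8; decide
  by_cases k9 : c = '4'; · subst k9; decide
  by_cases k10 : c = '5'; · subst k10; decide
  by_cases k11 : c = '6'; · subst k11; decide
  by_cases k12 : c = '7'; · subst k12; decide
  by_cases k13 : c = '8'; · subst k13; decide
  by_cases k14 : c = '9'; · subst k14; decide
  have hrange : ¬ ('0' ≤ c ∧ c ≤ '9') := by
    rintro ⟨hlo, hhi⟩
    have hlo' : (48 : Nat) ≤ c.toNat := by simpa [Char.le_def] using hlo
    have hhi' : c.toNat ≤ 57 := by simpa [Char.le_def] using hhi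
    have n5 := pv_toNat_ne c '0' k5
    have n6 := pv_toNat_ne c '1' k6
    have n7 := pv_toNat_ne c '2' k7
    have n8 := pv_toNat_ne c '3' k8
    have n9 := pv_toNat_ne c '4' k9
    have n10 := pv_toNat_ne c '5' k10
    have n11 := pv_toNat_ne c '6' k11
    have n12 := pv_toNat_ne c '7' k12
    have n13 := pv_toNat_ne c '8' k13
    have n14 := pv_toNat_ne c '9' k14
    simp only [Char.toNat, show '0'.val.toNat = 48 from by decide,
      show '1'.val.toNat = 49 from by decide, show '2'.val.toNat = 50 from by decide,
      show '3'.val.toNat = 51 from by decide, show '4'.val.toNat = 52 from by decide,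
      show '5'.val.toNat = 53 from by decide, show '6'.val.toNat = 54 from by decide,
      show '7'.val.toNat = 55 from by decide, show '8'.val.toNat = 56 from by decide,
      show '9'.val.toNat = 57 from by decide] at n5 n6 n7 n8 n9 n10 n11 n12 n13 n14 hlo' hhi'
    omega
  simp [pvSubB, pvSub, k1, k2, k3, k4, k5, k6, k7, k8, k9, k10, k11, k12, k13, k14, hrange]

-- the loop accumulates exactly the map of pvSubB
lemma pv_foldl_map (l : List Char) (acc : List (List Char)) :
    l.foldl (fun out c => out ++ [pvSubB c]) acc = acc ++ l.map pvSubB := by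
  induction l generalizing acc with
  | nil => simp
  | cons h t ih => simp [List.foldl, ih]

lemma pv_toListB (s : String) : (safecmd_alt s).toList = s.toList.flatMap pvSub := by
  simp only [safecmd_alt, pv_foldl_map, List.nil_append, pv_join_nil,
    String.toList_ofList]
  rw [List.map_congr_left (fun c _ => pv_subB_eq c), ← List.flatMap_def]

-- ===== VERDICT (by name: the statement is the Claim_ definition above) =====
theorem safecmd_spec : Claim_equal_safecmd := by
  intro s _
  show safecmd s = safecmd_alt s
  calc safecmd s = String.ofList (safecmd s).toList := String.ofList_toList.symm
    _ = String.ofList (safecmd_alt s).toList := by rw [pv_toListA, pv_toListB]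
    _ = safecmd_alt s := String.ofList_toList
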